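-- pv_equiv track=rewrite | github.com/seafly886/FinGenius | src/tool/create_html_optimized.py | _compress_research_results
-- ===== SOURCE A (Python) =====
-- from typing import Dict, Any, Optional
--
-- def _compress_research_results(research_results: Dict[str, str]) -> Dict[str, str]:
--     """压缩研究结果，避免过长"""
--     compressed = {}
--     for key, value in research_results.items():
--         if len(value) > 1000:  # 如果内容过长，截取摘要
--             lines = value.split('\n')
--             summary_lines = []
--             char_count = 0
--
--             for line in lines:
--                 if char_count + len(line) > 800:
--                     break
--                 summary_lines.append(line)
--                 char_count += len(line)
--
--             compressed[key] = '\n'.join(summary_lines) + '\n\n[内容已压缩，完整内容请查看原始数据文件]'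
--         else:
--             compressed[key] = value
--
--     return compressed
-- ===== SOURCE B (Python) =====
-- from bisect import bisect_right
-- from itertools import accumulate
--
--
-- def _summarize(value: str) -> str:
--     """Summary of an over-long value: the longest line prefix whose total
--     character count (newlines excluded) stays within 800, plus the banner."""
--     lines = value.split('\n')
--     prefix = list(accumulate(len(line) for line in lines))
--     k = bisect_right(prefix, 800)
--     return '\n'.join(lines[:k]) + '\n\n[内容已压缩，完整内容请查看原始数据文件]'
--
--
-- def _compress_research_results(research_results):
--     return {key: (_summarize(value) if len(value) > 1000 else value)
--             for key, value in research_results.items()}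
-- ===== Notes on version B (the rewrite author's own statement) =====
-- stated objective: alternative
-- what changed: The accumulate-and-break loop over lines is replaced by a prefix-sum table (itertools.accumulate) plus a bisect_right binary search for the number of lines fitting the 800-char budget, and the hand-built dict loop by a dict comprehension over a summarize helper.
import Mathlib
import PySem

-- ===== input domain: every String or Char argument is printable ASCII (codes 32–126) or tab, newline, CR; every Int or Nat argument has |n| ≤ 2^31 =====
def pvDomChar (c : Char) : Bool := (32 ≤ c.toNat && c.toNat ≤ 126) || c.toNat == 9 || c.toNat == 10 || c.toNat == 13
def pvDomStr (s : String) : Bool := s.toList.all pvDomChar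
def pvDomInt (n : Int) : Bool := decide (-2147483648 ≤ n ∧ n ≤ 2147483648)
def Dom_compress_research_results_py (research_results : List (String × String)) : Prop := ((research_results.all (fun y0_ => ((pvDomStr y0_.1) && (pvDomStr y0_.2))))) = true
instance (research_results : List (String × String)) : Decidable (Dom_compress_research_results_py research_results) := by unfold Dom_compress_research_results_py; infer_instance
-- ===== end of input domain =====

-- B replaces A's accumulate-and-break line loop by a prefix-sum table plus a bisect_right
-- cutoff search, and A's hand-built dict loop by a per-value map (dict comprehension).

-- ===== PORT A =====
-- the inner 'for line in lines: if char_count + len(line) > 800: break; …' loop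
def pvALoop (lines : List String) (summary_lines : List String) (char_count : Int) :
    List String :=
  match lines with
  | [] => summary_lines
  | line :: rest =>
      if char_count + PySem.Str.len line > 800 then summary_lines
      else pvALoop rest (summary_lines ++ [line]) (char_count + PySem.Str.len line)

-- one iteration of A's dict-building loop ('compressed[key] = …')
def pvAStep (compressed : PySem.Dict String String) (kv : String × String) :
    PySem.Dict String String :=
  if PySem.Str.len kv.2 > 1000 then
    -- value.split('\n'): sep = "\n" ≠ "", so split? is always 'some' (getD default unreachable)
    let lines := (PySem.Str.split? kv.2 "\n").getD []
    let summary_lines := pvALoop lines [] 0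
    compressed.insert kv.1
      (PySem.Str.join "\n" summary_lines ++ "\n\n[内容已压缩，完整内容请查看原始数据文件]")
  else compressed.insert kv.1 kv.2

def compress_research_results_py (research_results : List (String × String)) :
    List (String × String) :=
  (research_results.foldl pvAStep PySem.Dict.empty).items

-- ===== PORT B =====
-- itertools.accumulate with running total c (called with c = 0), ported step for step (exact)
def pvAccum (c : Int) : List Int → List Int
  | [] => []
  | x :: xs => (c + x) :: pvAccum (c + x) xs

def pvSummarize (value : String) : String :=
  let lines := (PySem.Str.split? value "\n").getD []   -- sep ≠ "", always 'some'
  let pfx := pvAccum 0 (lines.map PySem.Str.len)       -- list(accumulate(len(line) for line in lines))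
  let k := PySem.List.bisectRight pfx 800              -- bisect.bisect_right(prefix, 800)
  -- lines[:k] with k : Nat (k ≥ 0) is exactly List.take k
  PySem.Str.join "\n" (List.take k lines) ++ "\n\n[内容已压缩，完整内容请查看原始数据文件]"

def compress_research_results_py_alt (research_results : List (String × String)) :
    List (String × String) :=
  research_results.map (fun kv =>
    (kv.1, if PySem.Str.len kv.2 > 1000 then pvSummarize kv.2 else kv.2))

-- ===== PRECONDITION & SPEC =====
-- Pre_ excludes association lists with duplicate keys: the Python argument is a dict, which
-- cannot contain duplicate keys at all, so these lists represent no Python input of A.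
def Pre_compress_research_results_py (research_results : List (String × String)) : Prop :=
  (research_results.map Prod.fst).Nodup
instance (research_results : List (String × String)) : Decidable (Pre_compress_research_results_py research_results) := by unfold Pre_compress_research_results_py; infer_instance

def pvWitness_compress_research_results_py : (List (String × String)) := [("a", "b"), ("c", "d")]

def Spec_compress_research_results_py (research_results : List (String × String)) (out : List (String × String)) : Prop := out = compress_research_results_py_alt research_results
instance (research_results : List (String × String)) (out : List (String × String)) : Decidable (Spec_compress_research_results_py research_results out) := by unfold Spec_compress_research_results_py; infer_instance

-- ===== CLAIM (what is proved, stated in full; the proofs are below) =====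
def Claim_equal_compress_research_results_py : Prop := ∀ (research_results : List (String × String)), Dom_compress_research_results_py research_results → Pre_compress_research_results_py research_results → Spec_compress_research_results_py research_results (compress_research_results_py research_results)

-- ===== LEMMAS AND PROOFS =====

theorem pvALoop_cons (l : String) (rest acc : List String) (c : Int) :
    pvALoop (l :: rest) acc c =
      if c + PySem.Str.len l > 800 then acc
      else pvALoop rest (acc ++ [l]) (c + PySem.Str.len l) := rfl

-- every element of pvAccum c xs is ≥ c when all xs are nonnegative
theorem pvAccum_ge (xs : List Int) (c : Int) (h : ∀ x ∈ xs, 0 ≤ x) :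
    ∀ y ∈ pvAccum c xs, c ≤ y := by
  induction xs generalizing c with
  | nil => simp [pvAccum]
  | cons x xs ih =>
      intro y hy
      have hx : 0 ≤ x := h x (by simp)
      rcases (by simpa [pvAccum] using hy : y = c + x ∨ y ∈ pvAccum (c + x) xs) with h1 | h1
      · omega
      · have := ih (c + x) (fun z hz => h z (by simp [hz])) y h1; omega

theorem pvAccum_pairwise (xs : List Int) (c : Int) (h : ∀ x ∈ xs, 0 ≤ x) :
    (pvAccum c xs).Pairwise (· ≤ ·) := by
  induction xs generalizing c with
  | nil => simp [pvAccum]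
  | cons x xs ih =>
      refine List.pairwise_cons.mpr ⟨?_, ih (c + x) (fun z hz => h z (by simp [hz]))⟩
      exact fun y hy => pvAccum_ge xs (c + x) (fun z hz => h z (by simp [hz])) y hy

-- once the running total has exceeded 800, no prefix sum can come back under it
theorem pvAccum_count_zero (xs : List Int) (c : Int) (h : ∀ x ∈ xs, 0 ≤ x)
    (hc : 800 < c) : (pvAccum c xs).countP (fun s => decide (s ≤ 800)) = 0 := by
  induction xs generalizing c with
  | nil => simp [pvAccum]
  | cons x xs ih =>
      have hx : 0 ≤ x := h x (by simp)
      have hd : decide (c + x ≤ 800) = false := decide_eq_false (by omega)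
      rw [pvAccum, List.countP_cons, hd,
        ih (c + x) (fun z hz => h z (by simp [hz])) (by omega)]
      simp

theorem pvLens_nonneg (rest : List String) : ∀ x ∈ rest.map PySem.Str.len, 0 ≤ x := by
  intro x hx
  rcases List.mem_map.mp hx with ⟨s, _, rfl⟩
  simp [PySem.Str.len_eq]

-- A's break-loop keeps exactly as many leading lines as there are prefix sums ≤ 800
theorem pvALoop_eq_take (lines : List String) (acc : List String) (c : Int) :
    pvALoop lines acc c =
      acc ++ lines.take
        ((pvAccum c (lines.map PySem.Str.len)).countP (fun s => decide (s ≤ 800))) := by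
  induction lines generalizing acc c with
  | nil => simp [pvALoop, pvAccum]
  | cons l rest ih =>
      rw [pvALoop_cons, List.map_cons, pvAccum, List.countP_cons]
      by_cases hbr : c + PySem.Str.len l > 800
      · have hd : decide (c + PySem.Str.len l ≤ 800) = false := decide_eq_false (by omega)
        rw [if_pos hbr, hd, pvAccum_count_zero _ _ (pvLens_nonneg rest) (by omega)]
        simp
      · have hd : decide (c + PySem.Str.len l ≤ 800) = true := decide_eq_true (by omega)
        rw [if_neg hbr, ih, hd]
        simp [List.take_succ_cons]

-- on a nondecreasing list, bisect_right 800 is the number of elements ≤ 800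
theorem bisectRight_eq_countP (p : List Int) (hp : p.Pairwise (· ≤ ·)) :
    PySem.List.bisectRight p 800 = p.countP (fun s => decide (s ≤ 800)) := by
  obtain ⟨hk, hlo, hhi⟩ := PySem.List.bisectRight_spec p 800 hp
  set k := PySem.List.bisectRight p 800 with hkdef
  have h1 : (p.take k).countP (fun s => decide (s ≤ 800)) = (p.take k).length := by
    apply List.countP_eq_length.mpr
    intro a ha
    rcases List.mem_iff_getElem.mp ha with ⟨j, hj, rfl⟩
    have hjk : j < k := by
      have := hj; rw [List.length_take] at this; omega
    rw [List.getElem_take]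
    exact decide_eq_true (hlo j (by rw [List.length_take] at hj; omega) hjk)
  have h2 : (p.drop k).countP (fun s => decide (s ≤ 800)) = 0 := by
    apply List.countP_eq_zero.mpr
    intro a ha
    rcases List.mem_iff_getElem.mp ha with ⟨j, hj, rfl⟩
    have hjlen : k + j < p.length := by
      rw [List.length_drop] at hj; omega
    rw [List.getElem_drop]
    simp only [decide_eq_true_eq]
    exact not_le.mpr (hhi (k + j) hjlen (by omega))
  conv_rhs => rw [← List.take_append_drop k p]
  rw [List.countP_append, h1, h2, List.length_take]
  omega

-- the per-value summaries agree
theorem summary_eq (v : String) :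
    PySem.Str.join "\n" (pvALoop ((PySem.Str.split? v "\n").getD []) [] 0) ++
      "\n\n[内容已压缩，完整内容请查看原始数据文件]"
    = pvSummarize v := by
  unfold pvSummarize
  congr 2
  rw [pvALoop_eq_take,
    bisectRight_eq_countP _ (pvAccum_pairwise _ 0 (pvLens_nonneg _))]
  simp

-- the value A's loop stores for one key
def pvAVal (v : String) : String :=
  if PySem.Str.len v > 1000 then
    PySem.Str.join "\n" (pvALoop ((PySem.Str.split? v "\n").getD []) [] 0) ++
      "\n\n[内容已压缩，完整内容请查看原始数据文件]"
  else v

theorem pvAVal_eq_B (v : String) :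
    pvAVal v = if PySem.Str.len v > 1000 then pvSummarize v else v := by
  unfold pvAVal
  by_cases h : PySem.Str.len v > 1000
  · rw [if_pos h, if_pos h, summary_eq]
  · rw [if_neg h, if_neg h]

-- A's dict-building fold over fresh keys just appends items
theorem foldl_pvAStep_items (rr : List (String × String)) (d : PySem.Dict String String)
    (hnd : (rr.map Prod.fst).Nodup) (hfresh : ∀ kv ∈ rr, d.contains kv.1 = false) :
    (rr.foldl pvAStep d).items = d.items ++ rr.map (fun kv => (kv.1, pvAVal kv.2)) := by
  induction rr generalizing d with
  | nil => simp
  | cons kv rest ih =>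
      rw [List.map_cons, List.nodup_cons] at hnd
      have hne : ∀ kv' ∈ rest, kv'.1 ≠ kv.1 := by
        intro kv' h' heq
        exact hnd.1 (heq ▸ List.mem_map_of_mem h')
      have hstep : pvAStep d kv = d.insert kv.1 (pvAVal kv.2) := by
        unfold pvAStep pvAVal
        split <;> rfl
      have hfresh' : ∀ kv' ∈ rest, (d.insert kv.1 (pvAVal kv.2)).contains kv'.1 = false := by
        intro kv' h'
        rw [PySem.Dict.contains_insert]
        simp only [Bool.or_eq_false_iff]
        exact ⟨by simpa using hne kv' h', hfresh kv' (by simp [h'])⟩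
      have hitems : (d.insert kv.1 (pvAVal kv.2)).items = d.items ++ [(kv.1, pvAVal kv.2)] :=
        PySem.Dict.items_insert_of_not_contains _ _ (hfresh kv (by simp))
      rw [List.foldl_cons, hstep, ih _ hnd.2 hfresh', hitems, List.map_cons]
      simp

-- ===== VERDICT (by name: the statement is the Claim_ definition above) =====
theorem compress_research_results_py_spec : Claim_equal_compress_research_results_py := by
  intro rr _hDom hPre
  unfold Spec_compress_research_results_py
  unfold compress_research_results_py compress_research_results_py_alt
  rw [foldl_pvAStep_items rr PySem.Dict.empty hPre (fun kv _ => rfl)]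
  have hempty : (PySem.Dict.empty : PySem.Dict String String).items = [] := rfl
  rw [hempty, List.nil_append]
  exact List.map_congr_left (fun kv _ => by rw [pvAVal_eq_B])
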